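-- pv_equiv track=rewrite | github.com/LeenaaAlhabsi/Package-Measurement-Conversion | updated_main_app.py | to_value_list
-- ===== SOURCE A (Python) =====
-- def char_to_value(c):
--     if c == '_':
--         return 0
--     if 'a' <= c <= 'z':
--         return ord(c) - ord('a') + 1
--     raise ValueError(f"Invalid character '{c}' in input string")
--
-- def to_value_list(s: str):
--     """Convert string to value list, handling 'z' special case."""
--     L = []
--     i = 0
--     n = len(s)
--     while i < n:
--         if s[i] == 'z':
--             total = 0
--             while i < n and s[i] == 'z':
--                 total += char_to_value(s[i])
--                 i += 1
--             if i < n: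
--                 total += char_to_value(s[i])
--                 i += 1
--             L.append(total)
--         else:
--             L.append(char_to_value(s[i]))
--             i += 1
--     return L
-- ===== SOURCE B (Python) =====
-- import re
--
-- def char_to_value(c):
--     if c == '_':
--         return 0
--     if 'a' <= c <= 'z':
--         return ord(c) - ord('a') + 1
--     raise ValueError(f"Invalid character '{c}' in input string")
--
-- def to_value_list(s: str):
--     """Convert string to value list, handling 'z' special case."""
--     tokens = re.findall(r'z+.?|[^z]', s, re.DOTALL)
--     return [sum(char_to_value(c) for c in tok) for tok in tokens]
-- ===== Notes on version B (the rewrite author's own statement) =====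
-- stated objective: idiomatic
-- what changed: Replaces the nested index-driven while loops with a one-shot regex tokenization (z+.?|[^z]) followed by a per-token sum comprehension.
import Mathlib
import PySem

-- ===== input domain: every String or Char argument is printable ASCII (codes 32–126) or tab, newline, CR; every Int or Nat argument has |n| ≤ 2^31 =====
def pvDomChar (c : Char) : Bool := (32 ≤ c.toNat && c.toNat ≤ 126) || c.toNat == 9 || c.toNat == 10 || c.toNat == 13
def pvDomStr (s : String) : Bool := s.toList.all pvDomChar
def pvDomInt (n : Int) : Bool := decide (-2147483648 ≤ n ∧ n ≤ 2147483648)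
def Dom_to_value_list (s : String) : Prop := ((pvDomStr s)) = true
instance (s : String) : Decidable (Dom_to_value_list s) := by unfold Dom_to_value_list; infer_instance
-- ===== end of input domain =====

-- B tokenizes the string in one shot (z-run plus at most one char, or a single non-'z' char)
-- and maps a per-token sum, replacing A's nested index-driven while loops: more idiomatic.
-- A raises ValueError on characters other than '_' and 'a'..'z'; Pre_ excludes exactly those inputs.


-- ===== PORT A =====
-- char_to_value; the invalid-character branch raises in Python (excluded by Pre_), here it returns 0
def pvCharToValue (c : Char) : Int :=
  if c = '_' then 0
  else if 'a' ≤ c ∧ c ≤ 'z' then (c.toNat : Int) - 96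
  else 0

-- A's inner while loop (consume z's accumulating) plus the one extra char after it
def pvAZrun : List Char → Int → Int × List Char
  | [], total => (total, [])
  | c :: rest, total =>
    if c = 'z' then pvAZrun rest (total + pvCharToValue c)
    else (total + pvCharToValue c, rest)

theorem pvAZrun_len_le (l : List Char) (t : Int) : (pvAZrun l t).2.length ≤ l.length := by
  induction l generalizing t with
  | nil => simp [pvAZrun]
  | cons c rest ih =>
    simp only [pvAZrun]
    split
    · exact le_trans (ih _) (by simp)
    · simp

-- A's outer while loop
def pvAGo : List Char → List Int
  | [] => []
  | c :: rest =>
    if c = 'z' then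
      let r := pvAZrun rest (pvCharToValue c)
      r.1 :: pvAGo r.2
    else pvCharToValue c :: pvAGo rest
termination_by l => l.length
decreasing_by
  · exact Nat.lt_succ_of_le (pvAZrun_len_le rest _)
  · simp

def to_value_list (s : String) : List Int := pvAGo s.toList

-- ===== PORT B =====
-- re.findall(r'z+.?|[^z]', s, re.DOTALL): a maximal z-run plus at most one char, or a single non-'z' char
def pvBTokens : List Char → List (List Char)
  | [] => []
  | c :: rest =>
    if c = 'z' then
      match h : rest.dropWhile (· = 'z') with
      | [] => [c :: rest.takeWhile (· = 'z')]
      | d :: rest' => (c :: (rest.takeWhile (· = 'z') ++ [d])) :: pvBTokens rest'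
    else [c] :: pvBTokens rest
termination_by l => l.length
decreasing_by
  · have h2 := rest.length_dropWhile_le (· = 'z')
    rw [h] at h2
    simp at h2 ⊢
    omega
  · simp

-- sum(char_to_value(c) for c in tok)
def pvBTokSum (tok : List Char) : Int := (tok.map pvCharToValue).sum

def to_value_list_alt (s : String) : List Int := (pvBTokens s.toList).map pvBTokSum

-- ===== PRECONDITION & SPEC =====
-- A raises ValueError on any character other than '_' and 'a'..'z'; Pre_ admits exactly the strings without such characters.
def Pre_to_value_list (s : String) : Prop :=
  s.toList.all (fun c => c == '_' || ('a' ≤ c && c ≤ 'z')) = true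
instance (s : String) : Decidable (Pre_to_value_list s) := by unfold Pre_to_value_list; infer_instance

def pvWitness_to_value_list : String := "zzab_z"

def Spec_to_value_list (s : String) (out : List Int) : Prop := out = to_value_list_alt s
instance (s : String) (out : List Int) : Decidable (Spec_to_value_list s out) := by unfold Spec_to_value_list; infer_instance

-- ===== CLAIM (what is proved, stated in full; the proofs are below) =====
def Claim_equal_to_value_list : Prop := ∀ (s : String), Dom_to_value_list s → Pre_to_value_list s → Spec_to_value_list s (to_value_list s)

-- ===== LEMMAS AND PROOFS =====

-- A's inner loop computed from B's takeWhile/dropWhile decomposition of the z-run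
theorem pvAZrun_eq (l : List Char) (t : Int) :
    pvAZrun l t =
      match l.dropWhile (· = 'z') with
      | [] => (t + pvBTokSum (l.takeWhile (· = 'z')), [])
      | d :: r => (t + pvBTokSum (l.takeWhile (· = 'z')) + pvCharToValue d, r) := by
  induction l generalizing t with
  | nil => simp [pvAZrun, pvBTokSum]
  | cons c rest ih =>
    by_cases hc : c = 'z'
    · simp only [pvAZrun, ih, List.dropWhile_cons, List.takeWhile_cons,
        hc, decide_true, pvBTokSum]
      cases rest.dropWhile (· = 'z') <;> simp <;> ring
    · simp [pvAZrun, hc, pvBTokSum]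

-- unfolding lemmas for B's tokenizer on a leading 'z'
theorem pvBTokens_z_nil (rest : List Char) (h : rest.dropWhile (· = 'z') = []) :
    pvBTokens ('z' :: rest) = ['z' :: rest.takeWhile (· = 'z')] := by
  rw [pvBTokens.eq_def]
  split
  · rename_i heq
    cases heq
  · rename_i c2 rest2 heq
    injection heq with hc2 hr2
    subst hc2 hr2
    rw [if_pos rfl]
    split
    · rfl
    · rename_i d rest' heq2
      rw [h] at heq2
      cases heq2

theorem pvBTokens_z_cons (rest : List Char) (d : Char) (rest' : List Char)
    (h : rest.dropWhile (· = 'z') = d :: rest') :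
    pvBTokens ('z' :: rest) = ('z' :: (rest.takeWhile (· = 'z') ++ [d])) :: pvBTokens rest' := by
  rw [pvBTokens.eq_def]
  split
  · rename_i heq
    cases heq
  · rename_i c2 rest2 heq
    injection heq with hc2 hr2
    subst hc2 hr2
    rw [if_pos rfl]
    split
    · rename_i heq2
      rw [h] at heq2
      cases heq2
    · rename_i d1 rest1 heq2
      rw [h] at heq2
      injection heq2 with hd hr
      subst hd hr
      rfl

theorem pvAGo_eq_tokens (l : List Char) : pvAGo l = (pvBTokens l).map pvBTokSum := by
  induction l using pvBTokens.induct with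
  | case1 => simp [pvAGo, pvBTokens]
  | case2 rest h =>
    have hrest : rest.takeWhile (· = 'z') = rest := by
      conv_rhs => rw [← List.takeWhile_append_dropWhile (p := (· = 'z')) (l := rest)]
      simp [h]
    simp [pvAGo, pvAZrun_eq, h, hrest, pvBTokens_z_nil rest h, pvBTokSum]
  | case3 rest d rest' h ih =>
    simp only [pvAGo, pvAZrun_eq, h, ih, pvBTokens_z_cons rest d rest' h]
    simp [pvBTokSum]
    ring
  | case4 c rest hc ih =>
    simp [pvAGo, pvBTokens, hc, ih, pvBTokSum]

-- ===== VERDICT (by name: the statement is the Claim_ definition above) =====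
theorem to_value_list_spec : Claim_equal_to_value_list := by
  intro s _ _
  unfold Spec_to_value_list to_value_list to_value_list_alt
  exact pvAGo_eq_tokens s.toList
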